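/- GENERATED by farm/worked/mk_tree_copies.py from farm/worked/get8_packet_raw/Proof.lean (a worked proof of the farm's unit `get8_packet_raw`,
   accepted by the verdict) — do not edit. -/
/-
  `get8_packet_raw` (CONTRACTS 49; stb_vorbis_fixed.c:1591): WHERE LEMMA μ'S STRICT DECREASE IS PROVED.

      10cf40 push rbx ; mov rbx, rdi
      10cf44 check load1 [f + 1748] ; cmp byte [rbx + 0x6d4], 0 ; jne J             if (!f->bytes_in_seg) {
      10cf59 check load4 [f + 1756] ; cmp dword [rbx + 0x6dc], 0 ; jne E1            if (f->last_seg) return EOP;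
      10cf6e mov rdi, rbx ; call next_segment ; test eax, eax ; je E2                 else if (!next_segment(f)) return EOP; }
      10cf7a J: movzx eax, byte [rbx + 0x6d4] ; sub eax, 1 ; mov [rbx + 0x6d4], al     --f->bytes_in_seg;
      10cf8a check load4 [f + 1772] ; mov eax, [rbx + 0x6ec] ; add eax, 1 ; mov [rbx + 0x6ec], eax    ++f->packet_bytes;
      10cfa5 mov rdi, rbx ; call get8 ; movzx eax, al ; X: pop rbx ; ret              return get8(f);
      10cfb2 E1: mov eax, -1 ; jmp X          10cfb9 E2: mov eax, -1 ; jmp X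

  THE TAIL from the join `J` is proved once (`htail`), for any state `s` at `J` with: rbx = f, rsp = u.rsp − 8, the function's
  footprint between `u.mem` and `s.mem`, no shadow store, the two stack slots, DF, MXCSR, the code, `Bits f` of `s.mem`,
  `1 ≤ bytes_in_seg`, `mu s.mem f ≤ mu u.mem f`. It is entered twice: from the test (`bytes_in_seg ≠ 0` on entry) and after
  next_segment returned a non-zero length (`NextSegmentPost.segment`).
-/
import Asan.CheckWalk
import Vorbis.Spec.ReaderLemmas
import Vorbis.Spec.Units.get8_packet_raw

open X86 X86.User Asan Vorbis

set_option maxRecDepth 4000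
set_option maxHeartbeats 4000000


/-- `get8_packet_raw(f)` satisfies its contract. -/
theorem Vorbis.Spec.Worked.get8_packet_raw_ok : Vorbis.Spec.get8_packet_raw.Statement := by
  intro Lay hLay μ hμ u₀ hcode hload1 hload4 h_seg h_get8 others frames Blk len u ret he hpre
  v_entry he
  have hseg := h_seg others frames Blk len
  have hg8 := h_get8 others frames Blk len
  have hsp := hpre.shadow.rsp
  have hwhere := hpre.where_obj
  obtain ⟨f, hf⟩ : ∃ f : Nat, (u.reg .rdi).toNat = f := ⟨_, rfl⟩
  have hr : u.reg .rdi = addr f := eq_addr _ _ hf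
  have hbits : Bits Blk len u.mem f := hf ▸ hpre.bits
  have hL : BlkLive Blk (Live (stackObjs frames ++ others)) := hpre.env.live
  have hobr := hbits.OBR
  simp only [voff] at hobr
  rw [hf] at hwhere
  -- THE TAIL from the join 10cf7a
  have htail : ∀ s : State, s.rip = Vorbis.L.get8_packet_raw.join1 → s.reg .rbx = addr f → s.reg .rsp = u.reg .rsp - 8 →
      RegsKept [.rdi, .rbx, .rsp, .rax, .rdx, .rcx, .rsi, .r8, .r9, .r10, .r11,
        .r16, .r17, .r18, .r19, .r20, .r21, .r22, .r23, .r24, .r25, .r26, .r27, .r28, .r29, .r30, .r31] u s →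
      Mem.SameExcept [⟨(u.reg .rsp).toNat - 256, (u.reg .rsp).toNat⟩,
        ⟨f + 48, f + 56⟩, ⟨f + 84, f + 96⟩, ⟨f + 136, f + 144⟩, ⟨f + 1484, f + 1749⟩, ⟨f + 1752, f + 1764⟩,
        ⟨f + 1772, f + 1784⟩] u.mem s.mem →
      ShadowUntouched u.mem s.mem →
      UInt64.ofNat (s.mem.readLE (u.reg .rsp) 8) = ret →
      UInt64.ofNat (s.mem.readLE (u.reg .rsp - 8) 8) = u.reg .rbx →
      s.flags.get .df = false → s.mxcsr &&& 8064 = 8064 →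
      Mem.EqOn Vorbis.L.textLo Vorbis.L.textHi u₀.mem s.mem →
      Bits Blk len s.mem f →
      1 ≤ stb_vorbis.bytes_in_seg s.mem f →
      mu s.mem f ≤ mu u.mem f →
      ReachVia Lay μ WayInv s (Returned (conv u₀) (Vorbis.Spec.get8_packet_raw.spec others frames Blk len) u ret) := by
    intro s w_rip w_rbx w_rsp w_kept hsame hun hs0 hs1 hdf hmx w_eq hb hB hmu
    have r1748 : s.mem.readLE (addr f + 1748) 1 = stb_vorbis.bytes_in_seg s.mem f := by
      simp only [vfield, vacc, voff]
    have hBlt : stb_vorbis.bytes_in_seg s.mem f < 2 ^ 8 := by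
      simp only [vacc]
      exact Mem.u8_lt _ _
    have hval := Vorbis.Spec.PacketRaw.dec_byte_val (stb_vorbis.bytes_in_seg s.mem f) hB hBlt
    -- the memory at the call of get8: `Bits`, and μ STRICTLY smaller than at the join
    have hchain := fun c1 c2 v2 => Vorbis.Spec.PacketRaw.dec_chain hb hB (u.reg .rsp - 16) c1 c2 v2
      (by u_omega) (by u_omega)
    u_walk hcode [hμ.vendor] span [Vorbis.L.textLo, Vorbis.L.textHi] side (v_side)
    case check_10cf91 =>
      -- 0x10cf91, load4 [f + 1772] (`f->packet_bytes`)
      have hun' : ShadowUntouched u.mem s_10cf91.mem := by v_untouched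
      have hs := hbits.site_field hL 1772 4 (by omega) (by omega) rfl
      exact Vorbis.Spec.check_site hpre.shadow.inv hun' hs (by u_omega)
    case call_inv =>
      refine Vorbis.abiInv_of ?_ ?_
      · rw [w_flags]
        simp only [X86.User.df_setStatus]
        exact w_df_10cf91
      · rw [w_mxcsr]
        exact hmx
    case pre_10cfa8 =>
      have hun' : ShadowUntouched u.mem s_10cfa8.mem := by v_untouched
      have hsh : ShadowPre others frames s_10cfa8 := hpre.shadow.call hun' (by u_omega) (by u_omega) (by u_omega)
      refine hpre.again hsh (w_rdi.trans hr.symm) ?_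
      rw [hf, w_mem, Vorbis.addr_add_lit, Vorbis.addr_add_lit, hval]
      exact (hchain _ _ _).1
    -- 10cfad, the state get8 returned: its postcondition and footprint with the entry state's registers resolved
    have hp := w_post
    have c_rdi := w_rdi_10cfa8.trans hr.symm
    have c_rsp := w_rsp_10cfa8
    have w_eq := Vorbis.conv_code_eqOn w_code
    simp only [X86.User.Spec.footprint, vspec, c_rsp, c_rdi, hf] at w_same
    have hpost : Vorbis.Spec.Get8Post Blk len (s_10cfa8.reg .rdi).toNat s_10cfa8 s_10cfa8r := hp
    rw [c_rdi, hf] at hpost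
    have hmu4 : mu s_10cfa8.mem f < mu s.mem f := by
      rw [w_mem_10cfa8, Vorbis.addr_add_lit, Vorbis.addr_add_lit, hval]
      exact (hchain _ _ _).2
    have hp0 : UInt64.ofNat (s_10cfa8.mem.readLE (u.reg .rsp) 8) = ret := by u_resolve
    have hp1 : UInt64.ofNat (s_10cfa8.mem.readLE (u.reg .rsp - 8) 8) = u.reg .rbx := by u_resolve
    have hs0r : UInt64.ofNat (s_10cfa8r.mem.readLE (u.reg .rsp) 8) = ret := by u_frame hp0
    have hs1r : UInt64.ofNat (s_10cfa8r.mem.readLE (u.reg .rsp - 8) 8) = u.reg .rbx := by u_frame hp1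
    clear hp0 hp1
    rw [w_mem_10cfa8] at w_same
    have hunr : ShadowUntouched u.mem s_10cfa8r.mem := by v_untouched
    have hdfr : s_10cfa8r.flags.get .df = false := (show X86.User.abiInv _ from w_inv).1
    have hmxr : s_10cfa8r.mxcsr &&& 8064 = 8064 := (show X86.User.abiInv _ from w_inv).2
    have hfin : Mem.SameExcept [⟨(u.reg .rsp).toNat - 256, (u.reg .rsp).toNat⟩,
        ⟨f + 48, f + 56⟩, ⟨f + 84, f + 96⟩, ⟨f + 136, f + 144⟩, ⟨f + 1484, f + 1749⟩, ⟨f + 1752, f + 1764⟩,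
        ⟨f + 1772, f + 1784⟩] u.mem s_10cfa8r.mem := by
      refine Vorbis.Spec.Reader.sameExcept_through_callee ?_ w_same ?_
      · u_same
      · simp only [List.forall_mem_cons, List.not_mem_nil, false_imp_iff, implies_true, and_true, X86.User.inSpans_cons,
          X86.User.inSpans_nil, or_false]
        repeat' apply And.intro
        all_goals u_omega
    have hbyte := hpost.byte
    u_walk hcode [hμ.vendor] span [Vorbis.L.textLo, Vorbis.L.textHi] side (v_side)
    -- `movzx eax, al ; pop rbx ; ret`
    refine ReachVia.done ?_
    rw [← w_mem] at hfin hunr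
    have hrd := hpost.reader
    rw [← w_mem] at hrd
    refine X86.User.Returned.mk w_rip w_rsp ?_ ?_ (Vorbis.conv_code_in w_eq) ?_ ?_
    · u_saved
    · simp only [X86.User.Spec.footprint, vspec, hf]
      exact hfin
    · refine Vorbis.abiInv_of ?_ ?_
      · rw [w_flags]
        exact hdfr
      · rw [w_mxcsr]
        exact hmxr
    show Vorbis.Spec.PacketRawPost Blk len (u.reg .rdi).toNat u s_10cfb1
    rw [hf]
    have hlt : (s_10cfb1.reg .rax).toNat < 256 := by
      rw [w_rax]
      exact Vorbis.Spec.PacketRaw.movzx8_lt _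
    have hmule := hrd.mu_le
    refine ⟨hunr, ⟨hrd.bits, by omega⟩, Or.inr hlt, ?_, ?_, ?_⟩
    · -- THE STRICT DECREASE
      intro _
      omega
    · intro he
      exfalso
      rw [he, Vorbis.Spec.EOP_toNat] at hlt
      omega
    · exact Vorbis.Spec.PacketRaw.bitsSame_of_footprint (by omega) (by omega) hfin
  have r1748 : u.mem.readLE (addr f + 1748) 1 = stb_vorbis.bytes_in_seg u.mem f := by
    simp only [vfield, vacc, voff]
  have hBlt : stb_vorbis.bytes_in_seg u.mem f < 2 ^ 8 := by
    simp only [vacc]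
    exact Mem.u8_lt _ _
  u_walk hcode [hμ.vendor] until [Vorbis.L.get8_packet_raw.join1] span [Vorbis.L.textLo, Vorbis.L.textHi] side (v_side)
  case check_10cf4b =>
    -- 0x10cf4b, load1 [f + 1748] (`f->bytes_in_seg`)
    have hun : ShadowUntouched u.mem s_10cf4b.mem := by v_untouched
    have hs := hbits.site_field hL 1748 1 (by omega) (by omega) rfl
    exact Vorbis.Spec.check_site hpre.shadow.inv hun hs (by u_omega)
  case check_10cf60 =>
    -- 0x10cf60, load4 [f + 1756] (`f->last_seg`)
    have hun : ShadowUntouched u.mem s_10cf60.mem := by v_untouched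
    have hs := hbits.site_field hL 1756 4 (by omega) (by omega) rfl
    exact Vorbis.Spec.check_site hpre.shadow.inv hun hs (by u_omega)
  case call_inv =>
    refine Vorbis.abiInv_of ?_ ?_
    · rw [w_flags]
      simp only [X86.User.df_setStatus]
      exact w_df_10cf60
    · rw [w_mxcsr]
      exact he_mx
  case pre_10cf71 =>
    have hun : ShadowUntouched u.mem s_10cf71.mem := by v_untouched
    have hsh : ShadowPre others frames s_10cf71 := hpre.shadow.call hun (by u_omega) (by u_omega) (by u_omega)
    have hw : Mem.SameExcept [⟨(u.reg .rsp).toNat - 16, (u.reg .rsp).toNat⟩] u.mem s_10cf71.mem := by u_same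
    have hk := Vorbis.Spec.PacketRaw.of_pushes hbits hw (by omega)
    refine hpre.again hsh (w_rdi.trans hr.symm) ?_
    rw [hf]
    exact hk.1
  · -- 10cf7a reached from the test: `bytes_in_seg ≠ 0` on entry
    have hw : Mem.SameExcept [⟨(u.reg .rsp).toNat - 16, (u.reg .rsp).toNat⟩] u.mem s_10cf57.mem := by u_same
    obtain ⟨hb1, hmu1, hB1⟩ := Vorbis.Spec.PacketRaw.of_pushes hbits hw (by omega)
    refine htail s_10cf57 w_rip w_rbx w_rsp (w_kept.mono_all (by rfl)) ?_ ?_ ?_ ?_ ?_ ?_ w_eq hb1 ?_ (Nat.le_of_eq hmu1)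
    · u_same
    · v_untouched
    · u_resolve
    · u_resolve
    · rw [w_flags]
      simp only [X86.User.df_setStatus]
      exact w_df_10cf4b
    · rw [w_mxcsr]
      exact he_mx
    · rw [hB1]
      omega
  · -- E1 (10cfb2): `last_seg ≠ 0`: EOP, nothing written but the stack
    refine ReachVia.done ?_
    have hfin : Mem.SameExcept [⟨(u.reg .rsp).toNat - 256, (u.reg .rsp).toNat⟩,
        ⟨f + 48, f + 56⟩, ⟨f + 84, f + 96⟩, ⟨f + 136, f + 144⟩, ⟨f + 1484, f + 1749⟩, ⟨f + 1752, f + 1764⟩,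
        ⟨f + 1772, f + 1784⟩] u.mem s_10cfb1.mem := by
      u_same
    have hw : Mem.SameExcept [⟨(u.reg .rsp).toNat - 16, (u.reg .rsp).toNat⟩] u.mem s_10cfb1.mem := by u_same
    obtain ⟨hb1, hmu1, hB1⟩ := Vorbis.Spec.PacketRaw.of_pushes hbits hw (by omega)
    refine X86.User.Returned.mk w_rip w_rsp ?_ ?_ (Vorbis.conv_code_in w_eq) ?_ ?_
    · u_saved
    · simp only [X86.User.Spec.footprint, vspec, hf]
      exact hfin
    · refine Vorbis.abiInv_of ?_ ?_
      · rw [w_flags]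
        simp only [X86.User.df_setStatus]
        exact w_df_10cf60
      · rw [w_mxcsr]
        exact he_mx
    show Vorbis.Spec.PacketRawPost Blk len (u.reg .rdi).toNat u s_10cfb1
    rw [hf]
    have hrax : s_10cfb1.reg .rax = Vorbis.Spec.EOP := by
      rw [w_rax]
      rfl
    refine ⟨by v_untouched, ⟨hb1, Nat.le_of_eq hmu1⟩, Or.inl hrax, ?_, ?_, ?_⟩
    · intro hne
      exact absurd hrax hne
    · intro _
      rw [hB1]
      omega
    · exact Vorbis.Spec.PacketRaw.bitsSame_of_footprint (by omega) (by omega) hfin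
  · -- 10cf76, the state next_segment returned: its postcondition and footprint with the entry state's registers resolved
    have hp := w_post
    have c_rdi := w_rdi_10cf71.trans hr.symm
    have c_rsp := w_rsp_10cf71
    have w_eq := Vorbis.conv_code_eqOn w_code
    simp only [X86.User.Spec.footprint, vspec, c_rsp, c_rdi, hf] at w_same
    have hpost : Vorbis.Spec.NextSegmentPost Blk len (s_10cf71.reg .rdi).toNat s_10cf71 s_10cf71r := hp
    rw [c_rdi, hf] at hpost
    -- the memory at the call: the two pushes are off `*f`
    have hw : Mem.SameExcept [⟨(u.reg .rsp).toNat - 16, (u.reg .rsp).toNat⟩] u.mem s_10cf71.mem := by u_same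
    obtain ⟨hb1, hmu1, hB1⟩ := Vorbis.Spec.PacketRaw.of_pushes hbits hw (by omega)
    have hp0 : UInt64.ofNat (s_10cf71.mem.readLE (u.reg .rsp) 8) = ret := by u_resolve
    have hp1 : UInt64.ofNat (s_10cf71.mem.readLE (u.reg .rsp - 8) 8) = u.reg .rbx := by u_resolve
    have hs0 : UInt64.ofNat (s_10cf71r.mem.readLE (u.reg .rsp) 8) = ret := by u_frame hp0
    have hs1 : UInt64.ofNat (s_10cf71r.mem.readLE (u.reg .rsp - 8) 8) = u.reg .rbx := by u_frame hp1
    clear hp0 hp1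
    rw [w_mem_10cf71] at w_same
    have hun : ShadowUntouched u.mem s_10cf71r.mem := by v_untouched
    have hdf : s_10cf71r.flags.get .df = false := (show X86.User.abiInv _ from w_inv).1
    have hmx : s_10cf71r.mxcsr &&& 8064 = 8064 := (show X86.User.abiInv _ from w_inv).2
    -- the function's footprint up to here: the pushes, then the callee's windows, each inside one of this function's
    have hsame : Mem.SameExcept [⟨(u.reg .rsp).toNat - 256, (u.reg .rsp).toNat⟩,
        ⟨f + 48, f + 56⟩, ⟨f + 84, f + 96⟩, ⟨f + 136, f + 144⟩, ⟨f + 1484, f + 1749⟩, ⟨f + 1752, f + 1764⟩,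
        ⟨f + 1772, f + 1784⟩] u.mem s_10cf71r.mem := by
      refine Vorbis.Spec.Reader.sameExcept_through_callee ?_ w_same ?_
      · u_same
      · simp only [List.forall_mem_cons, List.not_mem_nil, false_imp_iff, implies_true, and_true, X86.User.inSpans_cons,
          X86.User.inSpans_nil, or_false]
        repeat' apply And.intro
        all_goals u_omega
    have hbyte := hpost.byte
    u_walk hcode [hμ.vendor] until [Vorbis.L.get8_packet_raw.join1] span [Vorbis.L.textLo, Vorbis.L.textHi] side (v_side)
    · -- E2 (10cfb9): next_segment returned 0: EOP; `bytes_in_seg` was 0 and still is (`NextSegmentPost.empty`)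
      have hz : (s_10cf71r.reg .rax).toNat = 0 := by
        rw [Asan.part32_toNat] at hbr_10cf78
        omega
      have hrax0 : s_10cf71r.reg .rax = 0 := by
        apply UInt64.toNat_inj.mp
        rw [hz]
        rfl
      have hB2 := hpost.empty hrax0 (by rw [hB1]; omega)
      refine ReachVia.done ?_
      rw [← w_mem] at hsame hun hB2
      have hrd := hpost.reader
      rw [← w_mem] at hrd
      refine X86.User.Returned.mk w_rip w_rsp ?_ ?_ (Vorbis.conv_code_in w_eq) ?_ ?_
      · u_saved
      · simp only [X86.User.Spec.footprint, vspec, hf]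
        exact hsame
      · refine Vorbis.abiInv_of ?_ ?_
        · rw [w_flags]
          simp only [X86.User.df_setStatus]
          exact hdf
        · rw [w_mxcsr]
          exact hmx
      show Vorbis.Spec.PacketRawPost Blk len (u.reg .rdi).toNat u s_10cfb1
      rw [hf]
      have hrax : s_10cfb1.reg .rax = Vorbis.Spec.EOP := by
        rw [w_rax]
        rfl
      refine ⟨hun, ⟨hrd.bits, ?_⟩, Or.inl hrax, ?_, ?_, ?_⟩
      · have := hrd.mu_le
        omega
      · intro hne
        exact absurd hrax hne
      · intro _
        exact hB2
      · exact Vorbis.Spec.PacketRaw.bitsSame_of_footprint (by omega) (by omega) hsame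
    · -- 10cf7a reached after next_segment returned a non-zero length: `bytes_in_seg` = that length ≥ 1, μ already smaller
      have hne : s_10cf71r.reg .rax ≠ 0 := by
        intro h0
        apply hbr_10cf78
        rw [h0]
        rfl
      obtain ⟨hB2, hmu2⟩ := hpost.segment hne
      have hnz : (s_10cf71r.reg .rax).toNat ≠ 0 := by
        intro h0
        apply hne
        apply UInt64.toNat_inj.mp
        rw [h0]
        rfl
      rw [← w_mem] at hsame hun hs0 hs1 hB2 hmu2
      have hrd := hpost.reader
      rw [← w_mem] at hrd
      refine htail s_10cf78 w_rip w_rbx w_rsp w_kept hsame hun hs0 hs1 ?_ ?_ w_eq hrd.bits ?_ ?_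
      · rw [w_flags]
        simp only [X86.User.df_setStatus]
        exact hdf
      · rw [w_mxcsr]
        exact hmx
      · rw [hB2]
        omega
      · omega
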